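-- pv_equiv track=rewrite | github.com/Sush97/TalkingColors | recognize_concepts.py | createConceptTable
-- ===== SOURCE A (Python) =====
-- def createConceptTable(output):
--     """ Takes output string and returns a string representing the concept table
--     """
--
--     colors = ["RED", "ORANGE", "YELLOW", "GREEN", "BLUE", \
--         "PURPLE", "BLACK", "WHITE", "GREY", "PINK"]
--     attributes = ["BRIGHTER", "DARKER", "BRIGHT", "DARK", "SATURATED", "DESATURATED"]
--     degrees = ["A LOT", "MUCH", "A LITTLE", "A TINY BIT"]
--     directions = ["MORE", "LESS"]
--     output_formats = ["HEX", "RGB"]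
--
--     lists = [colors, attributes, degrees, directions, output_formats]
--
--     output_table = ["UNSPECIFIED", "UNSPECIFIED", "UNSPECIFIED", "UNSPECIFIED","UNSPECIFIED"]
--
--     for x in degrees:
--         if x in output:
--             output_table[2] = x
--
--     output = output.split()
--     for x in output:
--         for i in [0, 1, 3, 4]:
--             for y in lists[i]:
--                 if x == y:
--                     output_table[i] = y
--
--     return formatTable(output_table)
--
-- def formatTable(output_table):
--     """ Formats the string into a table (also a string)
--     """
--
--     table = ""
--     table += "Color:\t\t\t" + output_table[0] + "\n"
--     table += "Attribute:\t\t" + output_table[1] + "\n"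
--     table += "Degree:\t\t\t" + output_table[2] + "\n"
--     table += "Direction:\t\t" + output_table[3] + "\n"
--     table += "Output Format:\t" + output_table[4] + "\n"
--
--     return table
-- ===== SOURCE B (Python) =====
-- def createConceptTable(output):
--     """ Takes output string and returns a string representing the concept table
--     """
--     colors = ["RED", "ORANGE", "YELLOW", "GREEN", "BLUE", \
--         "PURPLE", "BLACK", "WHITE", "GREY", "PINK"]
--     attributes = ["BRIGHTER", "DARKER", "BRIGHT", "DARK", "SATURATED", "DESATURATED"]
--     degrees = ["A LOT", "MUCH", "A LITTLE", "A TINY BIT"]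
--     directions = ["MORE", "LESS"]
--     output_formats = ["HEX", "RGB"]
--
--     rev = output.split()[::-1]
--
--     def last_word_in(kws):
--         for w in rev:
--             if w in kws:
--                 return w
--         return "UNSPECIFIED"
--
--     degree = "UNSPECIFIED"
--     for x in reversed(degrees):
--         if x in output:
--             degree = x
--             break
--
--     return ("Color:\t\t\t" + last_word_in(colors) + "\n"
--             + "Attribute:\t\t" + last_word_in(attributes) + "\n"
--             + "Degree:\t\t\t" + degree + "\n"
--             + "Direction:\t\t" + last_word_in(directions) + "\n"
--             + "Output Format:\t" + last_word_in(output_formats) + "\n")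
-- ===== Notes on version B (the rewrite author's own statement) =====
-- stated objective: alternative
-- what changed: Replaces A's mutable 5-slot table filled by a triple-nested scan (every word against every keyword of every slot, last write wins) with an independent per-slot first-match search over the reversed word list (and reversed degree list), composing the result directly with no table.
import Mathlib
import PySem

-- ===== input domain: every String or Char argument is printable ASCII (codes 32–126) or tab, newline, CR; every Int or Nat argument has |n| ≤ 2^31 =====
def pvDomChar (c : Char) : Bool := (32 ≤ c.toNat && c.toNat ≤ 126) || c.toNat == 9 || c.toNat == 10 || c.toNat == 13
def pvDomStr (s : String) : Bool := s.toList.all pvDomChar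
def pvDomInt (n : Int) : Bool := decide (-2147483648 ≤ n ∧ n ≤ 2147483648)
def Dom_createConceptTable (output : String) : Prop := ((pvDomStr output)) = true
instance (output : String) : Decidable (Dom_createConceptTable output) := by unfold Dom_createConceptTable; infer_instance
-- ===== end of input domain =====

-- B replaces A's table of index-updates under a triple-nested per-word keyword scan by an
-- independent reversed-order first-match search per slot (objective: alternative, not faster).

def pvColors : List String :=
  ["RED", "ORANGE", "YELLOW", "GREEN", "BLUE", "PURPLE", "BLACK", "WHITE", "GREY", "PINK"]
def pvAttributes : List String :=
  ["BRIGHTER", "DARKER", "BRIGHT", "DARK", "SATURATED", "DESATURATED"]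
def pvDegrees : List String := ["A LOT", "MUCH", "A LITTLE", "A TINY BIT"]
def pvDirections : List String := ["MORE", "LESS"]
def pvFormats : List String := ["HEX", "RGB"]

-- ===== PORT A =====
def pvListsA : List (List String) := [pvColors, pvAttributes, pvDegrees, pvDirections, pvFormats]

-- table[i] reads/writes: indices are literal and in range of the 5-element table, so
-- List.set / List.getD are exact for Python's output_table[i] = y / output_table[i] here.
def formatTableA (t : List String) : String :=
  (((("" ++ ("Color:\t\t\t" ++ t.getD 0 "" ++ "\n"))
      ++ ("Attribute:\t\t" ++ t.getD 1 "" ++ "\n"))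
      ++ ("Degree:\t\t\t" ++ t.getD 2 "" ++ "\n"))
      ++ ("Direction:\t\t" ++ t.getD 3 "" ++ "\n"))
      ++ ("Output Format:\t" ++ t.getD 4 "" ++ "\n")

def createConceptTable (output : String) : String :=
  let table0 : List String :=
    ["UNSPECIFIED", "UNSPECIFIED", "UNSPECIFIED", "UNSPECIFIED", "UNSPECIFIED"]
  let table1 := pvDegrees.foldl
    (fun t x => if PySem.Str.isIn x output then t.set 2 x else t) table0
  let ws := PySem.Str.split₀ output
  let table2 := ws.foldl
    (fun t x =>
      ([0, 1, 3, 4] : List Nat).foldl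
        (fun t i =>
          (pvListsA.getD i []).foldl (fun t y => if x == y then t.set i y else t) t)
        t)
    table1
  formatTableA table2

-- ===== PORT B =====
def lastWordIn (rev : List String) (kws : List String) : String :=
  match rev.find? (fun w => kws.contains w) with
  | some w => w
  | none => "UNSPECIFIED"

def createConceptTable_alt (output : String) : String :=
  let rev := (PySem.Str.split₀ output).reverse
  let degree := (pvDegrees.reverse.find? (fun x => PySem.Str.isIn x output)).getD "UNSPECIFIED"
  "Color:\t\t\t" ++ lastWordIn rev pvColors ++ "\n"
    ++ ("Attribute:\t\t" ++ lastWordIn rev pvAttributes ++ "\n")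
    ++ ("Degree:\t\t\t" ++ degree ++ "\n")
    ++ ("Direction:\t\t" ++ lastWordIn rev pvDirections ++ "\n")
    ++ ("Output Format:\t" ++ lastWordIn rev pvFormats ++ "\n")

-- ===== PRECONDITION & SPEC =====
def Spec_createConceptTable (output : String) (out : String) : Prop := out = createConceptTable_alt output
instance (output : String) (out : String) : Decidable (Spec_createConceptTable output out) := by unfold Spec_createConceptTable; infer_instance

-- ===== CLAIM (what is proved, stated in full; the proofs are below) =====
def Claim_equal_createConceptTable : Prop := ∀ (output : String), Dom_createConceptTable output → Spec_createConceptTable output (createConceptTable output)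

-- ===== LEMMAS AND PROOFS =====

-- A's innermost scan over one keyword list sets slot i to x exactly when x occurs in the list.
lemma inner_scan (x : String) (i : Nat) (lst : List String) (t : List String) :
    lst.foldl (fun t y => if x == y then t.set i y else t) t
      = if lst.contains x then t.set i x else t := by
  induction lst generalizing t with
  | nil => simp
  | cons y ys ih =>
    rw [List.foldl_cons, List.contains_cons]
    by_cases h : (x == y) = true
    · have hxy : x = y := eq_of_beq h
      subst hxy
      rw [if_pos h, ih]
      by_cases h2 : ys.contains x = true
      · simp [List.set_set]
      · simp
    · rw [if_neg h, ih]
      simp only [Bool.not_eq_true] at h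
      simp [h]

-- last keyword of lst occurring in ws (by word order), else the default x
def lastIn (ws : List String) (lst : List String) (x : String) : String :=
  match ws.reverse.find? (fun w => lst.contains w) with
  | some w => w
  | none => x

lemma lastIn_nil (lst : List String) (x : String) : lastIn [] lst x = x := rfl

lemma lastIn_cons (w : String) (ws lst : List String) (x : String) :
    lastIn (w :: ws) lst x = lastIn ws lst (if lst.contains w then w else x) := by
  unfold lastIn
  simp only [List.reverse_cons, List.find?_append]
  cases hf : ws.reverse.find? (fun w => lst.contains w) with
  | some v => simp [Option.or]
  | none =>
    by_cases h : w ∈ lst <;> simp [List.find?, h, Option.or]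

-- one word-step of A on an explicit 5-slot table
lemma stepA_eq (x a b c d e : String) :
    ([0, 1, 3, 4] : List Nat).foldl
        (fun t i =>
          (pvListsA.getD i []).foldl (fun t y => if x == y then t.set i y else t) t)
        [a, b, c, d, e]
      = [if pvColors.contains x then x else a,
         if pvAttributes.contains x then x else b,
         c,
         if pvDirections.contains x then x else d,
         if pvFormats.contains x then x else e] := by
  have h0 : pvListsA.getD 0 [] = pvColors := rfl
  have h1 : pvListsA.getD 1 [] = pvAttributes := rfl
  have h3 : pvListsA.getD 3 [] = pvDirections := rfl
  have h4 : pvListsA.getD 4 [] = pvFormats := rfl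
  rw [List.foldl_cons, List.foldl_cons, List.foldl_cons, List.foldl_cons, List.foldl_nil,
    h0, h1, h3, h4, inner_scan, inner_scan, inner_scan, inner_scan]
  split_ifs <;> rfl

-- A's whole word loop, characterised slot by slot
lemma word_loop (ws : List String) (a b c d e : String) :
    ws.foldl
        (fun t x =>
          ([0, 1, 3, 4] : List Nat).foldl
            (fun t i =>
              (pvListsA.getD i []).foldl (fun t y => if x == y then t.set i y else t) t)
            t)
        [a, b, c, d, e]
      = [lastIn ws pvColors a, lastIn ws pvAttributes b, c,
         lastIn ws pvDirections d, lastIn ws pvFormats e] := by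
  induction ws generalizing a b c d e with
  | nil => simp [lastIn_nil]
  | cons w ws ih =>
    rw [List.foldl_cons]
    simp only [stepA_eq]
    rw [ih]
    simp only [lastIn_cons]

-- A's degree loop equals B's reversed first-match over the degrees
lemma degree_loop (output : String) :
    pvDegrees.foldl (fun t x => if PySem.Str.isIn x output then t.set 2 x else t)
        ["UNSPECIFIED", "UNSPECIFIED", "UNSPECIFIED", "UNSPECIFIED", "UNSPECIFIED"]
      = ["UNSPECIFIED", "UNSPECIFIED",
         (pvDegrees.reverse.find? (fun x => PySem.Str.isIn x output)).getD "UNSPECIFIED",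
         "UNSPECIFIED", "UNSPECIFIED"] := by
  simp only [pvDegrees, List.foldl_cons, List.foldl_nil, List.reverse_cons, List.reverse_nil,
    List.nil_append, List.cons_append, List.find?]
  cases h1 : PySem.Str.isIn "A LOT" output <;>
    cases h2 : PySem.Str.isIn "MUCH" output <;>
      cases h3 : PySem.Str.isIn "A LITTLE" output <;>
        cases h4 : PySem.Str.isIn "A TINY BIT" output <;>
          simp only [*] <;> rfl

lemma lastIn_eq_lastWordIn (ws lst : List String) :
    lastIn ws lst "UNSPECIFIED" = lastWordIn ws.reverse lst := rfl

-- ===== VERDICT (by name: the statement is the Claim_ definition above) =====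
theorem createConceptTable_spec : Claim_equal_createConceptTable := by
  intro output _
  show createConceptTable output = createConceptTable_alt output
  simp only [createConceptTable, createConceptTable_alt]
  rw [degree_loop, word_loop]
  simp only [lastIn_eq_lastWordIn, formatTableA, List.getD_cons_zero, List.getD_cons_succ,
    String.empty_append, String.append_assoc]
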